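-- pv_equiv track=rewrite | github.com/Qin-Yifang/0319 | task1.py | floor_root
-- ===== SOURCE A (Python) =====
-- def floor_root(number: int, power: int = 2) -> int:
--     """
--     Compute the floor of the p-th root of a non-negative integer.
--
--     Args:
--     - number: non-negative integer whose p-th root to be computed
--     - power: positive integer indicating the root (default: 2)
--
--     Returns:
--     - the largest integer r such that r^p <= number.
--
--     Example:
--     >>> floor_root(10, 3)
--     2
--     >>> floor_root(100, 2)
--     10
--     """
--     if number == 0 or number == 1:
--         return number
--
--     left, right = 1, number
--     result = None
--
--     while left <= right:
--         mid = (left + right) // 2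
--
--         if mid ** power == number:
--             return mid
--
--         if mid ** power < number:
--             left = mid + 1
--             result = mid
--         else:
--             right = mid - 1
--
--     return result
-- ===== SOURCE B (Python) =====
-- def floor_root(number: int, power: int = 2) -> int:
--     """Floor of the p-th root via integer Newton iteration instead of binary search."""
--     if number == 0 or number == 1:
--         return number
--     x = number
--     while True:
--         y = ((power - 1) * x + number // x ** (power - 1)) // power
--         if x <= y:
--             return x
--         x = y
-- ===== Notes on version B (the rewrite author's own statement) =====
-- stated objective: alternative
-- what changed: Replaced the binary search over [1, number] by an integer Newton iteration y = ((power-1)*x + number // x**(power-1)) // power that converges monotonically down to the floor root.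
-- outside the precondition, e.g. on floor_root(-3, 2): A returns None, B returns -3; on floor_root(5, 0): A returns 5, B raises ZeroDivisionError
import Mathlib
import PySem

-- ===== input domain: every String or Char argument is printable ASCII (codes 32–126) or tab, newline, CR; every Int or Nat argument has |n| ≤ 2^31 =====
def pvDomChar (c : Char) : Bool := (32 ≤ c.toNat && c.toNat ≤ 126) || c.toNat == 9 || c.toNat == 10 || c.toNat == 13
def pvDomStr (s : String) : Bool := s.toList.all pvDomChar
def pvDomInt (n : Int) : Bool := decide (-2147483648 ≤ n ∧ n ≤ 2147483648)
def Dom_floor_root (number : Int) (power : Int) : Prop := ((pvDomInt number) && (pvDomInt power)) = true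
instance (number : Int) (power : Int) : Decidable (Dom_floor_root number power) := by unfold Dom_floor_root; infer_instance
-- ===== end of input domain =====

-- B replaces A's binary search by an integer Newton iteration (alternative algorithm, return values proved equal on Pre_).

-- ===== PORT A =====
-- Binary-search loop of A; `mid ** power` is ported as `mid ^ power.toNat` (power ≥ 1 under Pre_).
-- `fuel` only makes the loop structurally recursive; the interval shrinks every step, so the
-- supplied fuel (the initial interval size) is never exhausted.
def floorRootGo (number : Int) (power : Int) (fuel : Nat) (left : Int) (right : Int) (result : Option Int) : Option Int :=
  match fuel with
  | 0 => result
  | fuel + 1 =>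
    if left ≤ right then
      let mid := PySem.Int.floordiv (left + right) 2
      if mid ^ power.toNat = number then some mid
      else if mid ^ power.toNat < number then
        floorRootGo number power fuel (mid + 1) right (some mid)
      else
        floorRootGo number power fuel left (mid - 1) result
    else result

def floor_root (number : Int) (power : Int) : Int :=
  if number = 0 ∨ number = 1 then number
  else
    -- Python's final `return result` returns None only when `result` was never set
    -- (only possible for number < 0, which Pre_ excludes); `.getD 0` stands for that None.
    (floorRootGo number power number.toNat 1 number none).getD 0

-- ===== PORT B =====
-- Newton loop of B; `fuel` only makes the loop structurally recursive: x strictly decreases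
-- while staying positive, so the supplied fuel (the starting value) is never exhausted.
def newtonGo (number : Int) (power : Int) (fuel : Nat) (x : Int) : Int :=
  match fuel with
  | 0 => x
  | fuel + 1 =>
    let y := PySem.Int.floordiv ((power - 1) * x + PySem.Int.floordiv number (x ^ (power.toNat - 1))) power
    if x ≤ y then x
    else newtonGo number power fuel y

def floor_root_alt (number : Int) (power : Int) : Int :=
  if number = 0 ∨ number = 1 then number
  else newtonGo number power number.toNat number

-- ===== PRECONDITION & SPEC =====
-- Pre_ excludes number < 0, on which A returns None (not an int), and power ≤ 0 with number ≥ 2,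
-- outside the function's documented domain, on which A's binary search returns `number` while B's Newton step divides by zero.
def Pre_floor_root (number : Int) (power : Int) : Prop :=
  0 ≤ number ∧ (1 ≤ power ∨ number ≤ 1)
instance (number : Int) (power : Int) : Decidable (Pre_floor_root number power) := by
  unfold Pre_floor_root; infer_instance

def pvWitness_floor_root : Int × Int := (10, 3)

def Spec_floor_root (number : Int) (power : Int) (out : Int) : Prop := out = floor_root_alt number power
instance (number : Int) (power : Int) (out : Int) : Decidable (Spec_floor_root number power out) := by
  unfold Spec_floor_root; infer_instance

-- ===== CLAIM (what is proved, stated in full; the proofs are below) =====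
def Claim_equal_floor_root : Prop := ∀ (number : Int) (power : Int), Dom_floor_root number power → Pre_floor_root number power → Spec_floor_root number power (floor_root number power)

-- ===== LEMMAS AND PROOFS =====

-- v is the floor of the p-th root of n
def IsRoot (n : Int) (p : Nat) (v : Int) : Prop := 1 ≤ v ∧ v ^ p ≤ n ∧ n < (v + 1) ^ p

theorem le_root_of_pow_le {n : Int} {p : Nat} {v m : Int} (hv : IsRoot n p v)
    (_hm : 0 ≤ m) (h : m ^ p ≤ n) : m ≤ v := by
  have h0 := hv.1
  have h3 := hv.2.2
  by_contra h'
  have h1 : v + 1 ≤ m := by omega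
  have h2 := pow_le_pow_left₀ (by omega : (0:Int) ≤ v + 1) h1 p
  linarith

theorem root_lt_of_lt_pow {n : Int} {p : Nat} {v m : Int} (hv : IsRoot n p v)
    (hm : 0 ≤ m) (h : n < m ^ p) : v < m := by
  by_contra h'
  have h1 : m ≤ v := by omega
  have h2 := pow_le_pow_left₀ hm h1 p
  have := hv.2.1
  linarith

-- weighted AM-GM for integers: (q+1)·r·x^q ≤ q·x^(q+1) + r^(q+1)
theorem newton_amgm (q : Nat) {x r : Int} (hx : 1 ≤ x) (hr : 1 ≤ r) :
    ((q : Int) + 1) * r * x ^ q ≤ (q : Int) * x ^ (q + 1) + r ^ (q + 1) := by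
  induction q with
  | zero => simp
  | succ q ih =>
    have hX : (0:Int) ≤ x ^ q := by positivity
    have e1 : x ^ (q + 1) = x ^ q * x := pow_succ x q
    have e2 : r ^ (q + 1 + 1) = r ^ (q + 1) * r := pow_succ r (q + 1)
    have e4 : x ^ (q + 1 + 1) = x ^ q * x * x := by rw [pow_succ, pow_succ]
    have hsign : 0 ≤ (x ^ q * x - r ^ (q + 1)) * (x - r) := by
      rcases le_total r x with h | h
      · have h2 := pow_le_pow_left₀ (by omega : (0:Int) ≤ r) h (q + 1)
        rw [e1] at h2
        nlinarith
      · have h2 := pow_le_pow_left₀ (by omega : (0:Int) ≤ x) h (q + 1)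
        rw [e1] at h2
        nlinarith
    rw [e1] at ih
    have ihx := mul_le_mul_of_nonneg_right ih (by omega : (0:Int) ≤ x)
    push_cast
    rw [e2, e4, e1]
    nlinarith [ihx, hsign]

-- the Newton step never drops below the floor root
theorem newton_step_ge {n : Int} {p : Nat} {v x : Int} (hp : 1 ≤ p) (hv : IsRoot n p v)
    (hx : 1 ≤ x) :
    v ≤ PySem.Int.floordiv (((p : Int) - 1) * x + PySem.Int.floordiv n (x ^ (p - 1))) (p : Int) := by
  obtain ⟨q, rfl⟩ : ∃ q, p = q + 1 := ⟨p - 1, by omega⟩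
  have hq : (q + 1) - 1 = q := by omega
  rw [hq]
  have hxq : (0:Int) < x ^ q := by positivity
  have hp0 : (0:Int) < ((q + 1 : Nat) : Int) := by push_cast; omega
  have amgm := newton_amgm q hx hv.1
  have hvp : v ^ (q + 1) ≤ n := hv.2.1
  have e1 : x ^ (q + 1) = x ^ q * x := pow_succ x q
  rw [e1] at amgm
  have h1 : (((q + 1 : Nat) : Int) * v - (((q + 1 : Nat) : Int) - 1) * x) * x ^ q ≤ n := by
    push_cast
    nlinarith [amgm, hvp]
  have h2 := (PySem.Int.le_floordiv_iff_mul_le hxq).mpr h1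
  rw [PySem.Int.le_floordiv_iff_mul_le hp0]
  nlinarith [h2]

-- above the root the Newton step strictly decreases
theorem newton_step_lt {n : Int} {p : Nat} {v x : Int} (hp : 1 ≤ p) (hv : IsRoot n p v)
    (hx : v < x) :
    PySem.Int.floordiv (((p : Int) - 1) * x + PySem.Int.floordiv n (x ^ (p - 1))) (p : Int) < x := by
  obtain ⟨q, rfl⟩ : ∃ q, p = q + 1 := ⟨p - 1, by omega⟩
  have hx1 : 1 ≤ x := by have := hv.1; omega
  have hxq : (0:Int) < x ^ q := by positivity
  have hp0 : (0:Int) < ((q + 1 : Nat) : Int) := by push_cast; omega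
  have hq : (q + 1) - 1 = q := by omega
  rw [hq]
  have hv1 := hv.1
  have hnx : n < x ^ (q + 1) := by
    have h1 : (v + 1) ^ (q + 1) ≤ x ^ (q + 1) :=
      pow_le_pow_left₀ (by omega : (0:Int) ≤ v + 1) (by omega) (q + 1)
    have := hv.2.2
    linarith
  have h2 : PySem.Int.floordiv n (x ^ q) < x := by
    rw [PySem.Int.floordiv_lt_iff_lt_mul hxq]
    have e3 : x ^ (q + 1) = x * x ^ q := by rw [pow_succ]; ring
    omega
  rw [PySem.Int.floordiv_lt_iff_lt_mul hp0]
  push_cast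
  nlinarith [h2]

theorem newtonGo_eq {n : Int} {p : Nat} {v : Int} (hp : 1 ≤ p) (hv : IsRoot n p v) :
    ∀ k : Nat, ∀ x : Int, x.toNat ≤ k → v ≤ x → newtonGo n (p : Int) k x = v := by
  intro k
  induction k with
  | zero =>
    intro x hxk hvx
    exfalso
    have := hv.1
    omega
  | succ k ih =>
    intro x hxk hvx
    have hx1 : 1 ≤ x := le_trans hv.1 hvx
    rw [newtonGo]
    have hpt : ((p : Int)).toNat = p := Int.toNat_natCast p
    rw [hpt]
    have hyv := newton_step_ge hp hv hx1
    set y := PySem.Int.floordiv (((p : Int) - 1) * x + PySem.Int.floordiv n (x ^ (p - 1))) (p : Int) with hy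
    by_cases hxy : x ≤ y
    · rw [if_pos hxy]
      by_contra hne
      have hvlt : v < x := by omega
      have := newton_step_lt hp hv hvlt
      omega
    · rw [if_neg hxy]
      exact ih y (by have := hv.1; omega) hyv

theorem floorRootGo_eq {n : Int} {p : Nat} {v : Int} (hp : 1 ≤ p) (hv : IsRoot n p v) :
    ∀ k : Nat, ∀ left right : Int, ∀ result : Option Int,
      (right + 1 - left).toNat ≤ k → 1 ≤ left → left - 1 ≤ v → v ≤ right →
      (result = some (left - 1) ∨ (result = none ∧ left = 1)) →
      floorRootGo n (p : Int) k left right result = some v := by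
  intro k
  induction k with
  | zero =>
    intro left right result hk h1 h2 h3 hres
    rw [floorRootGo]
    have hveq : v = left - 1 := by omega
    rcases hres with hres | ⟨hres, hleft1⟩
    · rw [hres, hveq]
    · exfalso; have := hv.1; omega
  | succ k ih =>
    intro left right result hk h1 h2 h3 hres
    by_cases hlr : left ≤ right
    · rw [floorRootGo, if_pos hlr]
      have hmid := PySem.Int.floordiv_two_mid_bounds hlr
      set mid := PySem.Int.floordiv (left + right) 2 with hmiddef
      have hpt : ((p : Int)).toNat = p := Int.toNat_natCast p
      rw [hpt]
      have hmid0 : 0 ≤ mid := by omega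
      by_cases heq : mid ^ p = n
      · rw [if_pos heq]
        have hle : mid ≤ v := le_root_of_pow_le hv hmid0 (le_of_eq heq)
        have hlt : v < mid + 1 := by
          refine root_lt_of_lt_pow hv (by omega) ?_
          calc n = mid ^ p := heq.symm
          _ < (mid + 1) ^ p := pow_lt_pow_left₀ (by omega) hmid0 (by omega)
        have : v = mid := by omega
        rw [this]
      · rw [if_neg heq]
        by_cases hltn : mid ^ p < n
        · rw [if_pos hltn]
          have hle : mid ≤ v := le_root_of_pow_le hv hmid0 (le_of_lt hltn)
          refine ih (mid + 1) right (some mid) (by omega) (by omega) (by omega) h3 ?_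
          left; congr 1; omega
        · rw [if_neg hltn]
          have hgt : n < mid ^ p := by omega
          have hvm : v < mid := root_lt_of_lt_pow hv hmid0 hgt
          exact ih left (mid - 1) result (by omega) h1 h2 (by omega) hres
    · rw [floorRootGo, if_neg hlr]
      have hveq : v = left - 1 := by omega
      rcases hres with hres | ⟨hres, hleft1⟩
      · rw [hres, hveq]
      · exfalso; have := hv.1; omega

theorem exists_root {n : Int} {p : Nat} (hn : 2 ≤ n) (hp : 1 ≤ p) : ∃ v, IsRoot n p v := by
  set n' := n.toNat with hn'
  have hn2 : 2 ≤ n' := by omega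
  have hcast : (n' : Int) = n := by omega
  set v0 := Nat.findGreatest (fun v => v ^ p ≤ n') n' with hv0
  have hP1 : (fun v => v ^ p ≤ n') 1 := by simp; omega
  have h1v : 1 ≤ v0 := Nat.le_findGreatest (by omega) hP1
  have hPv : v0 ^ p ≤ n' :=
    Nat.findGreatest_of_ne_zero (P := fun v => v ^ p ≤ n') (m := v0) hv0.symm (by omega)
  have hub : n' < (v0 + 1) ^ p := by
    by_cases hcase : v0 + 1 ≤ n'
    · have hnot := Nat.findGreatest_is_greatest (P := fun v => v ^ p ≤ n')
        (n := n') (k := v0 + 1) (by omega) hcase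
      exact Nat.lt_of_not_le (by simpa using hnot)
    · have hle := Nat.findGreatest_le (P := fun v => v ^ p ≤ n') n'
      have h := Nat.le_self_pow (by omega : p ≠ 0) (v0 + 1)
      exact lt_of_lt_of_le (by omega) h
  refine ⟨(v0 : Int), ⟨by exact_mod_cast h1v, ?_, ?_⟩⟩
  · rw [← hcast]; exact_mod_cast hPv
  · rw [← hcast]; exact_mod_cast hub

-- ===== VERDICT (by name: the statement is the Claim_ definition above) =====
theorem floor_root_spec : Claim_equal_floor_root := by
  intro number power _ hpre
  unfold Spec_floor_root
  by_cases hsmall : number = 0 ∨ number = 1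
  · simp [floor_root, floor_root_alt, hsmall]
  · have hn2 : 2 ≤ number := by rcases hpre with ⟨h0, _⟩; omega
    have hp1 : 1 ≤ power := by
      rcases hpre with ⟨_, h | h⟩
      · exact h
      · omega
    set p := power.toNat with hpdef
    have hpcast : (p : Int) = power := by omega
    have hp : 1 ≤ p := by omega
    obtain ⟨v, hv⟩ := exists_root hn2 hp
    have hvn : v ≤ number := by
      have h1 : v ≤ v ^ p := le_self_pow₀ hv.1 (by omega)
      have := hv.2.1
      omega
    have hA : floor_root number power = v := by
      rw [floor_root, if_neg hsmall, ← hpcast]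
      rw [floorRootGo_eq hp hv number.toNat 1 number none (by omega)
        (by omega) (by have := hv.1; omega) hvn (Or.inr ⟨rfl, rfl⟩)]
      rfl
    have hB : floor_root_alt number power = v := by
      rw [floor_root_alt, if_neg hsmall, ← hpcast]
      exact newtonGo_eq hp hv number.toNat number (by omega) hvn
    rw [hA, hB]
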